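-- pv_equiv track=rewrite | github.com/TubeSound/NWO | technical.py | detect_signal
-- ===== SOURCE A (Python) =====
-- def full(length, value):
--     return [value for _ in range(length)]
--
-- def detect_signal(data):
--     up_event = []
--     down_event = []
--     n = len(data)
--     up = full(n, 0)
--     down = full(n, 0)
--     active = 0
--     for i in range(n):
--         if active == 1:
--             if data[i] <= 0:
--                 up_event.append([begin, i])
--                 up[i] = -1
--                 active = 0
--         elif active == -1:
--             if data[i] >= 0:
--                 down[i] = -1
--                 down_event.append([begin, i])
--                 active = 0
--         else:
--             if data[i] == 1:
--                 up[i] = 1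
--                 begin = i
--                 active = 1
--             elif data[i] == -1:
--                 down[i] = 1
--                 begin = i
--                 active = -1
--     return up, down, up_event, down_event
-- ===== SOURCE B (Python) =====
-- def _scan(data, j, pos):
--     # advance j past the open run: while data[j] keeps the run open, move on
--     n = len(data)
--     while j < n and (data[j] > 0 if pos else data[j] < 0):
--         j += 1
--     return j
--
-- def detect_signal(data):
--     n = len(data)
--     up = [0] * n
--     down = [0] * n
--     up_event = []
--     down_event = []
--     i = 0
--     while i < n:
--         if data[i] == 1:
--             up[i] = 1
--             j = _scan(data, i + 1, True)
--             if j < n: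
--                 up[j] = -1
--                 up_event.append([i, j])
--             i = j + 1
--         elif data[i] == -1:
--             down[i] = 1
--             j = _scan(data, i + 1, False)
--             if j < n:
--                 down[j] = -1
--                 down_event.append([i, j])
--             i = j + 1
--         else:
--             i += 1
--     return up, down, up_event, down_event
-- ===== Notes on version B (the rewrite author's own statement) =====
-- stated objective: alternative
-- what changed: A threads a single pass through an 'active' state flag with a remembered 'begin'; B drops the state flag entirely and uses an outer scan for trigger elements (+1/-1) with a dedicated inner scan that finds the closing index, resuming the outer scan after it.
import Mathlib
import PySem

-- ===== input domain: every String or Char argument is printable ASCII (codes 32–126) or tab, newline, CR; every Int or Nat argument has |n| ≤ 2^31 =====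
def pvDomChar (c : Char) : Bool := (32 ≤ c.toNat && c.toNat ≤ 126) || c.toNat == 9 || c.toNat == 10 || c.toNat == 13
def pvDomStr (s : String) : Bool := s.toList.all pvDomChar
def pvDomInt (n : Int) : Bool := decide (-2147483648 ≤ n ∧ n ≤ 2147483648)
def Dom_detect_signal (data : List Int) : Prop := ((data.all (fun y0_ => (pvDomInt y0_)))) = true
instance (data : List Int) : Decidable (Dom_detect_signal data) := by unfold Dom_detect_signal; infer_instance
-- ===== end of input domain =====

-- B replaces A's flat single-pass state machine (an 'active' flag threaded through one loop)
-- by an outer scan for trigger elements with a dedicated inner scan for the closing index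
-- (objective: alternative decomposition, same O(n) cost).

-- ===== PORT A =====
def full (length : Int) (value : Int) : List Int :=
  (PySem.List.pyRange 0 length 1).map (fun _ => value)

-- A's for-loop over range(n); state = (up, down, up_event, down_event, active, begin)
def detectLoopA (data : List Int) (up down : List Int)
    (upE downE : List (List Int)) (active beginV : Int) (i : Nat) :
    List Int × List Int × List (List Int) × List (List Int) :=
  if h : i < data.length then
    if active = 1 then
      if data[i] ≤ 0 then
        detectLoopA data (up.set i (-1)) down (upE ++ [[beginV, (i : Int)]]) downE 0 beginV (i + 1)
      else
        detectLoopA data up down upE downE active beginV (i + 1)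
    else if active = -1 then
      if data[i] ≥ 0 then
        detectLoopA data up (down.set i (-1)) upE (downE ++ [[beginV, (i : Int)]]) 0 beginV (i + 1)
      else
        detectLoopA data up down upE downE active beginV (i + 1)
    else
      if data[i] = 1 then
        detectLoopA data (up.set i 1) down upE downE 1 (i : Int) (i + 1)
      else if data[i] = -1 then
        detectLoopA data up (down.set i 1) upE downE (-1) (i : Int) (i + 1)
      else
        detectLoopA data up down upE downE active beginV (i + 1)
  else (up, down, upE, downE)
termination_by data.length - i
decreasing_by all_goals omega

def detect_signal (data : List Int) : List Int × List Int × List (List Int) × List (List Int) :=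
  detectLoopA data (full (data.length : Int) 0) (full (data.length : Int) 0) [] [] 0 0 0

-- ===== PORT B =====
-- Source B's _scan: advance j while the run stays open
def scanB (data : List Int) (j : Nat) (pos : Bool) : Nat :=
  if h : j < data.length then
    if (if pos then data[j] > 0 else data[j] < 0) then scanB data (j + 1) pos else j
  else j
termination_by data.length - j
decreasing_by omega

-- needed by outerB's termination: _scan never moves backwards
lemma scanB_ge (data : List Int) (pos : Bool) : ∀ (k j : Nat), data.length - j ≤ k → j ≤ scanB data j pos := by
  intro k
  induction k with
  | zero =>
    intro j hk
    rw [scanB, dif_neg (by omega)]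
  | succ k ih =>
    intro j hk
    rw [scanB]
    split_ifs
    all_goals first
      | exact Nat.le_refl _
      | exact Nat.le_trans (Nat.le_succ j) (ih (j + 1) (by omega))

-- Source B's outer while loop; state = (up, down, up_event, down_event)
def outerB (data : List Int) (up down : List Int) (upE downE : List (List Int)) (i : Nat) :
    List Int × List Int × List (List Int) × List (List Int) :=
  if h : i < data.length then
    if data[i] = 1 then
      if hj : scanB data (i + 1) true < data.length then
        outerB data ((up.set i 1).set (scanB data (i + 1) true) (-1)) down
          (upE ++ [[(i : Int), ((scanB data (i + 1) true) : Int)]]) downE (scanB data (i + 1) true + 1)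
      else
        outerB data (up.set i 1) down upE downE (scanB data (i + 1) true + 1)
    else if data[i] = -1 then
      if hj : scanB data (i + 1) false < data.length then
        outerB data up ((down.set i 1).set (scanB data (i + 1) false) (-1)) upE
          (downE ++ [[(i : Int), ((scanB data (i + 1) false) : Int)]]) (scanB data (i + 1) false + 1)
      else
        outerB data up (down.set i 1) upE downE (scanB data (i + 1) false + 1)
    else
      outerB data up down upE downE (i + 1)
  else (up, down, upE, downE)
termination_by data.length - i
decreasing_by
  · have := scanB_ge data true (data.length - (i + 1)) (i + 1) le_rfl; omega
  · have := scanB_ge data true (data.length - (i + 1)) (i + 1) le_rfl; omega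
  · have := scanB_ge data false (data.length - (i + 1)) (i + 1) le_rfl; omega
  · have := scanB_ge data false (data.length - (i + 1)) (i + 1) le_rfl; omega
  · omega

def detect_signal_alt (data : List Int) : List Int × List Int × List (List Int) × List (List Int) :=
  outerB data (List.replicate data.length 0) (List.replicate data.length 0) [] [] 0

-- ===== PRECONDITION & SPEC =====
def Spec_detect_signal (data : List Int) (out : List Int × List Int × List (List Int) × List (List Int)) : Prop := out = detect_signal_alt data
instance (data : List Int) (out : List Int × List Int × List (List Int) × List (List Int)) : Decidable (Spec_detect_signal data out) := by unfold Spec_detect_signal; infer_instance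

-- ===== CLAIM (what is proved, stated in full; the proofs are below) =====
def Claim_equal_detect_signal : Prop := ∀ (data : List Int), Dom_detect_signal data → Spec_detect_signal data (detect_signal data)

-- ===== LEMMAS AND PROOFS =====
lemma scanB_out (data : List Int) (pos : Bool) (j : Nat) (h : ¬ j < data.length) :
    scanB data j pos = j := by
  rw [scanB, dif_neg h]

lemma full_eq_replicate (n : Nat) : full (n : Int) 0 = List.replicate n 0 := by
  unfold full
  rw [PySem.List.pyRange_one]
  simp [List.map_map, Function.comp_def]

-- the joint invariant: A's loop in each of its three 'active' states against B's decomposition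
lemma key (data : List Int) : ∀ (k i : Nat), data.length - i ≤ k →
    (∀ up down uE dE b, detectLoopA data up down uE dE 0 b i = outerB data up down uE dE i) ∧
    (∀ up down uE dE b, detectLoopA data up down uE dE 1 b i =
      (if _ : scanB data i true < data.length then
        outerB data (up.set (scanB data i true) (-1)) down
          (uE ++ [[b, ((scanB data i true) : Int)]]) dE (scanB data i true + 1)
      else (up, down, uE, dE))) ∧
    (∀ up down uE dE b, detectLoopA data up down uE dE (-1) b i =
      (if _ : scanB data i false < data.length then
        outerB data up (down.set (scanB data i false) (-1)) uE
          (dE ++ [[b, ((scanB data i false) : Int)]]) (scanB data i false + 1)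
      else (up, down, uE, dE))) := by
  intro k
  induction k with
  | zero =>
    intro i hk
    refine ⟨?_, ?_, ?_⟩ <;> intro up down uE dE b <;>
      rw [detectLoopA, dif_neg (by omega)]
    · rw [outerB, dif_neg (by omega)]
    · rw [scanB_out data true i (by omega), dif_neg (by omega)]
    · rw [scanB_out data false i (by omega), dif_neg (by omega)]
  | succ k ih =>
    intro i hk
    by_cases h : i < data.length
    · have ih1 := ih (i + 1) (by omega)
      refine ⟨?_, ?_, ?_⟩ <;> intro up down uE dE b
      · -- active = 0
        rw [detectLoopA, dif_pos h, if_neg (by norm_num), if_neg (by norm_num)]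
        rw [outerB, dif_pos h]
        by_cases h1 : data[i] = 1
        · rw [if_pos h1, if_pos h1, ih1.2.1]
          by_cases hj : scanB data (i + 1) true < data.length
          · rw [dif_pos hj, dif_pos hj]
          · rw [dif_neg hj, dif_neg hj, outerB, dif_neg (by omega)]
        · rw [if_neg h1, if_neg h1]
          by_cases h2 : data[i] = -1
          · rw [if_pos h2, if_pos h2, ih1.2.2]
            by_cases hj : scanB data (i + 1) false < data.length
            · rw [dif_pos hj, dif_pos hj]
            · rw [dif_neg hj, dif_neg hj, outerB, dif_neg (by omega)]
          · rw [if_neg h2, if_neg h2, ih1.1]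
      · -- active = 1
        rw [detectLoopA, dif_pos h, if_pos rfl]
        rw [scanB, dif_pos h]
        by_cases hle : data[i] ≤ 0
        · rw [if_pos hle, if_neg (by simp; omega), dif_pos h, ih1.1]
        · rw [if_neg hle, if_pos (by simp; omega), ih1.2.1]
      · -- active = -1
        rw [detectLoopA, dif_pos h, if_neg (by norm_num), if_pos rfl]
        rw [scanB, dif_pos h]
        by_cases hge : data[i] ≥ 0
        · rw [if_pos hge, if_neg (by simp; omega), dif_pos h, ih1.1]
        · rw [if_neg hge, if_pos (by simp; omega), ih1.2.2]
    · refine ⟨?_, ?_, ?_⟩ <;> intro up down uE dE b <;>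
        rw [detectLoopA, dif_neg (by omega)]
      · rw [outerB, dif_neg (by omega)]
      · rw [scanB_out data true i (by omega), dif_neg (by omega)]
      · rw [scanB_out data false i (by omega), dif_neg (by omega)]

-- ===== VERDICT (by name: the statement is the Claim_ definition above) =====
theorem detect_signal_spec : Claim_equal_detect_signal := by
  intro data _
  unfold Spec_detect_signal detect_signal detect_signal_alt
  rw [full_eq_replicate]
  exact (key data data.length 0 (by omega)).1 _ _ _ _ _
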